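-- pv_equiv track=rewrite | github.com/ucsb-cs8-f18/cs8-f18-lecture-code | lec13/tuples.py | equal_indices
-- ===== SOURCE A (Python) =====
-- def equal_indices(s1, s2):
--   '''(str, str) -> tuple of (int, int)
--   Return the number of indices where s1 and s2 are exactly equal,
--   and the number of indices where there is a match ignoring case.
--
--   >>> equal_indices('aBcd', 'abce')
--   (2, 1)
--   '''
--
--   exact = 0
--   case_insensitive = 0
--   for count in range(len(s1)):
--     if s1[count] == s2[count]:
--       exact += 1
--     elif s1[count].lower() == s2[count].lower():
--       case_insensitive += 1
--   return (exact, case_insensitive)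
-- ===== SOURCE B (Python) =====
-- def equal_indices(s1, s2):
--     exact = sum(1 for i in range(len(s1)) if s1[i] == s2[i])
--     ci_total = sum(1 for i in range(len(s1)) if s1[i].lower() == s2[i].lower())
--     return (exact, ci_total - exact)
-- ===== Notes on version B (the rewrite author's own statement) =====
-- stated objective: alternative
-- what changed: Replaces the single if/elif counting loop by two independent counts (exact matches and total case-insensitive matches) and returns (exact, ci_total - exact), using that exact matches are a subset of case-insensitive matches.
import Mathlib
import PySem

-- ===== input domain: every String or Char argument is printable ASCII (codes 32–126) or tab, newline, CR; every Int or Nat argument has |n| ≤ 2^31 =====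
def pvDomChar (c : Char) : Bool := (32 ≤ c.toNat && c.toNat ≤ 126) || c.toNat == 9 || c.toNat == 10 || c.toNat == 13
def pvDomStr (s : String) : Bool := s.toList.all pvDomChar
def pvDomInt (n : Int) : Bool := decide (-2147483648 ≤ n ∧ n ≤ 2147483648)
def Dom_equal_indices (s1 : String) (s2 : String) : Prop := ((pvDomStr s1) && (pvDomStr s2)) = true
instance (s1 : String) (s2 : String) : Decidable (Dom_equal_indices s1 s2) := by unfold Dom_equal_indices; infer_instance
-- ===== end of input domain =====

-- B replaces A's single if/elif loop by two independent counts (exact, case-insensitive total)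
-- and returns (exact, ci_total - exact); same O(n) cost, different decomposition.

-- ===== PORT A =====
-- A's for-loop over range(len(s1)) with the (exact, case_insensitive) pair as state;
-- s1[count] / s2[count] are in range under Pre_, ported with pyGetD.
def equal_indices (s1 : String) (s2 : String) : Int × Int :=
  let l1 := s1.toList
  let l2 := s2.toList
  (PySem.List.pyRange 0 l1.length 1).foldl
    (fun (st : Int × Int) i =>
      if PySem.List.pyGetD l1 i ' ' = PySem.List.pyGetD l2 i ' ' then
        (st.1 + 1, st.2)
      else if PySem.Chars.lowerChar (PySem.List.pyGetD l1 i ' ')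
              = PySem.Chars.lowerChar (PySem.List.pyGetD l2 i ' ') then
        (st.1, st.2 + 1)
      else st)
    (0, 0)

-- ===== PORT B =====
-- B's two generator-expression sums, ported as countP over the same index range.
def equal_indices_alt (s1 : String) (s2 : String) : Int × Int :=
  let l1 := s1.toList
  let l2 := s2.toList
  let exact : Int :=
    ((PySem.List.pyRange 0 l1.length 1).countP
      (fun i => decide (PySem.List.pyGetD l1 i ' ' = PySem.List.pyGetD l2 i ' ')) : Nat)
  let ciTotal : Int :=
    ((PySem.List.pyRange 0 l1.length 1).countP
      (fun i => decide (PySem.Chars.lowerChar (PySem.List.pyGetD l1 i ' ')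
                         = PySem.Chars.lowerChar (PySem.List.pyGetD l2 i ' '))) : Nat)
  (exact, ciTotal - exact)

-- ===== PRECONDITION & SPEC =====
-- Python A raises IndexError at s2[count] when len(s1) > len(s2); B raises identically there,
-- so exactly those inputs are excluded.
def Pre_equal_indices (s1 : String) (s2 : String) : Prop := s1.length ≤ s2.length
instance (s1 : String) (s2 : String) : Decidable (Pre_equal_indices s1 s2) := by
  unfold Pre_equal_indices; infer_instance
def pvWitness_equal_indices : String × String := ("aBcd", "abce")

def Spec_equal_indices (s1 : String) (s2 : String) (out : Int × Int) : Prop :=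
  out = equal_indices_alt s1 s2
instance (s1 : String) (s2 : String) (out : Int × Int) : Decidable (Spec_equal_indices s1 s2 out) := by
  unfold Spec_equal_indices; infer_instance

-- ===== CLAIM (what is proved, stated in full; the proofs are below) =====
def Claim_equal_equal_indices : Prop := ∀ (s1 : String) (s2 : String), Dom_equal_indices s1 s2 → Pre_equal_indices s1 s2 → Spec_equal_indices s1 s2 (equal_indices s1 s2)

-- ===== LEMMAS AND PROOFS =====

-- A's if/elif fold equals (countP p, countP q - countP p) whenever p implies q,
-- with the accumulator generalized.
theorem pvFold_eq_counts (P Q : Int → Prop) [DecidablePred P] [DecidablePred Q]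
    (hpq : ∀ i, P i → Q i) :
    ∀ (l : List Int) (e c : Int),
      l.foldl (fun (st : Int × Int) i =>
        if P i then (st.1 + 1, st.2)
        else if Q i then (st.1, st.2 + 1)
        else st) (e, c)
      = (e + (l.countP (fun i => decide (P i)) : Nat),
         c + ((l.countP (fun i => decide (Q i)) : Nat) - (l.countP (fun i => decide (P i)) : Nat))) := by
  intro l
  induction l with
  | nil => intro e c; simp
  | cons i l ih =>
    intro e c
    by_cases hp : P i
    · have hq := hpq i hp
      simp only [List.foldl_cons, hp, hq, if_true, List.countP_cons, ih]
      simp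
      ring
    · by_cases hq : Q i
      · simp only [List.foldl_cons, hp, hq, if_true, if_false, List.countP_cons, ih]
        simp
        ring
      · simp only [List.foldl_cons, hp, hq, if_false, List.countP_cons, ih]
        simp

-- ===== VERDICT (by name: the statement is the Claim_ definition above) =====
theorem equal_indices_spec : Claim_equal_equal_indices := by
  intro s1 s2 _ _
  unfold Spec_equal_indices equal_indices equal_indices_alt
  dsimp only
  rw [pvFold_eq_counts
    (fun i => PySem.List.pyGetD s1.toList i ' ' = PySem.List.pyGetD s2.toList i ' ')
    (fun i => PySem.Chars.lowerChar (PySem.List.pyGetD s1.toList i ' ')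
               = PySem.Chars.lowerChar (PySem.List.pyGetD s2.toList i ' '))
    (fun i hi => congrArg PySem.Chars.lowerChar hi)]
  simp
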